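-- pv_equiv track=rewrite | github.com/liebharc/homr | training/music_xml.py | group_in_measures
-- ===== SOURCE A (Python) =====
-- def group_in_measures(semantic: list[str]) -> tuple[str, list[list[str]]]:
--     result: list[list[str]] = []
--     clef = ""
--     key = ""
--     current_measure: list[str] = []
--     for symbol in semantic:
--         if symbol == "barline":
--             current_measure.append(symbol)
--             result.append(current_measure)
--             current_measure = []
--         else:
--             current_measure.append(symbol)
--             if symbol.startswith("clef"):
--                 clef = symbol
--             elif symbol.startswith("keySignature"):
--                 key = symbol
--     if len(current_measure) > 0:
--         result.append(current_measure)
--     prelude = clef + "+" + key + "+"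
--     return prelude, result
-- ===== SOURCE B (Python) =====
-- def group_in_measures(semantic: list[str]) -> tuple[str, list[list[str]]]:
--     clef = next((s for s in reversed(semantic) if s.startswith("clef")), "")
--     key = next((s for s in reversed(semantic) if s.startswith("keySignature")), "")
--     rev: list[list[str]] = []
--     for s in reversed(semantic):
--         if s == "barline" or not rev:
--             rev.append([s])
--         else:
--             rev[-1].append(s)
--     measures = [m[::-1] for m in rev[::-1]]
--     return clef + "+" + key + "+", measures
-- ===== Notes on version B (the rewrite author's own statement) =====
-- stated objective: alternative
-- what changed: Replaces A's single left-to-right loop threading four pieces of mutable state (result, clef, key, current measure) with independent passes: clef and key found by backward scans for the last matching symbol, and the measures built by one right-to-left pass that accumulates reversed measures (starting a new one at each barline) and mirrors them at the end.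
import Mathlib
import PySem

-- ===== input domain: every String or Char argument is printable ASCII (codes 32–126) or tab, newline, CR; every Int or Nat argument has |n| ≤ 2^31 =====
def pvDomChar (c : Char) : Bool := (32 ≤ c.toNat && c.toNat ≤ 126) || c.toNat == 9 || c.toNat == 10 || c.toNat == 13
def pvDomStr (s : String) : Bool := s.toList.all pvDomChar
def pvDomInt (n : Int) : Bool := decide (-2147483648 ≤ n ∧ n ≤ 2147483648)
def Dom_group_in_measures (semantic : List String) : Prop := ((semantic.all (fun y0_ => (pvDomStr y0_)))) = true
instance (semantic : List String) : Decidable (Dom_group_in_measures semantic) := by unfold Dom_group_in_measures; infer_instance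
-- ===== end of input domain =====

-- B separates concerns: the clef/key prelude comes from two backward scans for the last
-- matching symbol, and the measures from one right-to-left pass that accumulates reversed
-- measures (new one at each barline) and mirrors them at the end, instead of A's single
-- left-to-right loop threading a four-part mutable state (objective: alternative, same cost).

-- ===== PORT A =====
def loopA : List String → List (List String) → String → String → List String →
    List (List String) × String × String × List String
  | [], res, clef, key, cur => (res, clef, key, cur)
  | s :: rest, res, clef, key, cur =>
    if s == "barline" then
      loopA rest (res ++ [cur ++ [s]]) clef key []
    else
      if PySem.Str.startswith s "clef" then
        loopA rest res s key (cur ++ [s])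
      else if PySem.Str.startswith s "keySignature" then
        loopA rest res clef s (cur ++ [s])
      else
        loopA rest res clef key (cur ++ [s])

def group_in_measures (semantic : List String) : String × List (List String) :=
  let t := loopA semantic [] "" "" []
  let result := t.1 ++ (if 0 < t.2.2.2.length then [t.2.2.2] else [])
  (t.2.1 ++ "+" ++ t.2.2.1 ++ "+", result)

-- ===== PORT B =====
-- next((s for s in reversed(xs) if p s), "")
def findLastD (p : String → Bool) (xs : List String) : String :=
  (xs.reverse.find? p).getD ""

-- one step of B's loop over reversed(semantic): rev.append([s]) / rev[-1].append(s)
-- (the in-place appends are modelled functionally: list ++ [x], dropLast ++ [last ++ [x]])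
def stepRev (rev : List (List String)) (s : String) : List (List String) :=
  if s == "barline" || rev.isEmpty then rev ++ [[s]]
  else rev.dropLast ++ [((rev.getLast?).getD []) ++ [s]]

def group_in_measures_alt (semantic : List String) : String × List (List String) :=
  let clef := findLastD (fun s => PySem.Str.startswith s "clef") semantic
  let key := findLastD (fun s => PySem.Str.startswith s "keySignature") semantic
  let rev := semantic.reverse.foldl stepRev []
  -- [m[::-1] for m in rev[::-1]]  (a [::-1] slice is exactly List.reverse)
  let measures := (rev.reverse).map (fun m => m.reverse)
  (clef ++ "+" ++ key ++ "+", measures)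

-- ===== PRECONDITION & SPEC =====
def Spec_group_in_measures (semantic : List String) (out : String × List (List String)) : Prop := out = group_in_measures_alt semantic
instance (semantic : List String) (out : String × List (List String)) : Decidable (Spec_group_in_measures semantic out) := by unfold Spec_group_in_measures; infer_instance

-- ===== CLAIM (what is proved, stated in full; the proofs are below) =====
def Claim_equal_group_in_measures : Prop := ∀ (semantic : List String), Dom_group_in_measures semantic → Spec_group_in_measures semantic (group_in_measures semantic)

-- ===== LEMMAS AND PROOFS =====

-- B's loop, re-expressed with the measures kept reversed-at-the-front (cons instead of snoc)
def stepB (acc : List (List String)) (s : String) : List (List String) :=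
  if s == "barline" || acc.isEmpty then [s] :: acc
  else
    match acc with
    | m :: ms => (s :: m) :: ms
    | [] => [s] :: acc

-- the front-measure form of B's result, as a foldr
def gMeas (xs : List String) : List (List String) := xs.foldr (fun s acc => stepB acc s) []

def mirror (l : List (List String)) : List (List String) := (l.map List.reverse).reverse

lemma mirror_mirror (l : List (List String)) : mirror (mirror l) = l := by
  simp [mirror, List.map_reverse, List.map_map, Function.comp_def]

lemma stepRev_mirror (acc : List (List String)) (s : String) :
    stepRev (mirror acc) s = mirror (stepB acc s) := by
  cases acc with
  | nil => simp [stepRev, stepB, mirror]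
  | cons m ms =>
    by_cases hb : (s == "barline") = true
    · simp [stepRev, stepB, mirror, hb]
    · simp only [stepRev, stepB, mirror, hb, Bool.false_or]
      simp [List.map_cons, List.reverse_cons, List.dropLast_concat, List.getLast?_concat]

lemma foldl_stepRev_mirror (xs : List String) : ∀ acc : List (List String),
    xs.foldl stepRev (mirror acc) = mirror (xs.foldl stepB acc) := by
  induction xs with
  | nil => intro acc; rfl
  | cons x xs ih =>
    intro acc
    rw [List.foldl_cons, List.foldl_cons, stepRev_mirror, ih]

-- A's pending current measure merged into the measures of the remaining input
def consPend (cur : List String) (l : List (List String)) : List (List String) :=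
  if cur = [] then l else
  match l with
  | [] => [cur]
  | m :: ms => (cur ++ m) :: ms

lemma gMeas_eq_foldl (xs : List String) : xs.reverse.foldl stepB [] = gMeas xs := by
  simpa [gMeas] using List.foldl_reverse (l := xs) (f := stepB) (b := [])

lemma barline_not_clef : PySem.Str.startswith "barline" "clef" = false := by decide

lemma barline_not_key : PySem.Str.startswith "barline" "keySignature" = false := by decide

lemma key_not_clef (s : String) (h : PySem.Str.startswith s "keySignature" = true) :
    PySem.Str.startswith s "clef" = false := by
  by_contra hc
  rw [Bool.not_eq_false] at hc
  simp only [PySem.Str.startswith_eq] at h hc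
  obtain ⟨t1, e1⟩ := (PySem.Chars.startswith_iff _ _).mp h
  obtain ⟨t2, e2⟩ := (PySem.Chars.startswith_iff _ _).mp hc
  have hk : s.toList.head? = some 'k' := by rw [← e1]; rfl
  have hcc : s.toList.head? = some 'c' := by rw [← e2]; rfl
  rw [hk] at hcc
  simp at hcc

lemma find?_rev_cons (p : String → Bool) (x : String) (xs : List String) (c : String) :
    (((x :: xs).reverse).find? p).getD c = ((xs.reverse).find? p).getD (if p x then x else c) := by
  rw [List.reverse_cons, List.find?_append]
  cases h : xs.reverse.find? p <;> cases hp : p x <;> simp [h, hp, List.find?]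

lemma loopA_clef (xs : List String) : ∀ (res : List (List String)) (clef key : String)
    (cur : List String),
    (loopA xs res clef key cur).2.1 =
      ((xs.reverse).find? (fun s => PySem.Str.startswith s "clef")).getD clef := by
  induction xs with
  | nil => intro res clef key cur; simp [loopA]
  | cons x xs ih =>
    intro res clef key cur
    rw [find?_rev_cons]
    simp only [loopA]
    by_cases hb : (x == "barline") = true
    · have hx : x = "barline" := by simpa using hb
      subst hx
      rw [if_pos hb, ih]
      simp only [barline_not_clef, Bool.false_eq_true, if_false]
    · rw [if_neg hb]
      by_cases hc : PySem.Str.startswith x "clef" = true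
      · rw [if_pos hc, if_pos hc, ih]
      · rw [if_neg hc, if_neg hc]
        by_cases hk : PySem.Str.startswith x "keySignature" = true
        · rw [if_pos hk, ih]
        · rw [if_neg hk, ih]

lemma loopA_key (xs : List String) : ∀ (res : List (List String)) (clef key : String)
    (cur : List String),
    (loopA xs res clef key cur).2.2.1 =
      ((xs.reverse).find? (fun s => PySem.Str.startswith s "keySignature")).getD key := by
  induction xs with
  | nil => intro res clef key cur; simp [loopA]
  | cons x xs ih =>
    intro res clef key cur
    rw [find?_rev_cons]
    simp only [loopA]
    by_cases hb : (x == "barline") = true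
    · have hx : x = "barline" := by simpa using hb
      subst hx
      rw [if_pos hb, ih]
      simp only [barline_not_key, Bool.false_eq_true, if_false]
    · rw [if_neg hb]
      by_cases hc : PySem.Str.startswith x "clef" = true
      · have hk : ¬ PySem.Str.startswith x "keySignature" = true := by
          intro h
          rw [key_not_clef x h] at hc
          exact Bool.false_ne_true hc
        rw [if_pos hc, if_neg hk, ih]
      · rw [if_neg hc]
        by_cases hk : PySem.Str.startswith x "keySignature" = true
        · rw [if_pos hk, if_pos hk, ih]
        · rw [if_neg hk, if_neg hk, ih]

lemma gMeas_cons (x : String) (xs : List String) :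
    gMeas (x :: xs) = stepB (gMeas xs) x := rfl

lemma consPend_stepB (cur : List String) (l : List (List String)) (x : String)
    (hx : x ≠ "barline") :
    consPend (cur ++ [x]) l = consPend cur (stepB l x) := by
  cases l with
  | nil =>
    cases cur <;> simp [consPend, stepB, hx]
  | cons m ms =>
    cases cur <;> simp [consPend, stepB, hx]

lemma loopA_meas (xs : List String) : ∀ (res : List (List String)) (clef key : String)
    (cur : List String),
    (loopA xs res clef key cur).1 ++
      (if 0 < (loopA xs res clef key cur).2.2.2.length
        then [(loopA xs res clef key cur).2.2.2] else []) =
      res ++ consPend cur (gMeas xs) := by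
  induction xs with
  | nil =>
    intro res clef key cur
    cases cur <;> simp [loopA, gMeas, consPend]
  | cons x xs ih =>
    intro res clef key cur
    by_cases hb : x = "barline"
    · subst hb
      rw [gMeas_cons]
      have hstep : stepB (gMeas xs) ("barline") = ["barline"] :: gMeas xs := by
        simp [stepB]
      rw [hstep]
      have : consPend cur (["barline"] :: gMeas xs) = (cur ++ ["barline"]) :: gMeas xs := by
        cases cur <;> simp [consPend]
      rw [this]
      simp only [loopA, BEq.rfl, if_true]
      rw [ih]
      have : consPend [] (gMeas xs) = gMeas xs := by simp [consPend]
      rw [this]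
      simp
    · rw [gMeas_cons, ← consPend_stepB cur (gMeas xs) x hb]
      by_cases hc : PySem.Str.startswith x "clef" = true
      · simp only [loopA, hb, hc]
        simp only [beq_iff_eq, hb, if_false, if_true]
        exact ih res x key (cur ++ [x])
      · by_cases hk : PySem.Str.startswith x "keySignature" = true
        · simp only [loopA, hb, hc, hk]
          simp only [beq_iff_eq, hb, if_false, if_true, Bool.false_eq_true]
          exact ih res clef x (cur ++ [x])
        · simp only [loopA, hb, hc, hk]
          simp only [beq_iff_eq, hb, if_false, Bool.false_eq_true]
          exact ih res clef key (cur ++ [x])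

-- ===== VERDICT (by name: the statement is the Claim_ definition above) =====
theorem group_in_measures_spec : Claim_equal_group_in_measures := by
  intro semantic _
  unfold Spec_group_in_measures group_in_measures group_in_measures_alt
  dsimp only
  have hclef := loopA_clef semantic [] "" "" []
  have hkey := loopA_key semantic [] "" "" []
  have hmeas := loopA_meas semantic [] "" "" []
  have h0 : consPend ([] : List String) (gMeas semantic) = gMeas semantic := by
    simp [consPend]
  rw [h0, List.nil_append] at hmeas
  have hB : ((semantic.reverse.foldl stepRev []).reverse).map (fun m => m.reverse) =
      gMeas semantic := by
    have h1 : semantic.reverse.foldl stepRev [] = mirror (semantic.reverse.foldl stepB []) :=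
      foldl_stepRev_mirror semantic.reverse []
    rw [h1, gMeas_eq_foldl]
    have h2 : ∀ l : List (List String), ((mirror l).reverse).map (fun m => m.reverse) = l := by
      intro l
      have := mirror_mirror l
      simpa [mirror, List.map_reverse] using this
    exact h2 _
  simp only [findLastD]
  rw [hB]
  exact Prod.ext (by rw [hclef, hkey]) (by rw [hmeas])
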